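-- pv_equiv track=rewrite | github.com/Bae-Sangbin/CodingTest-Baekjoon-Programmers- | 프로그래머스/unrated/181834. l로 만들기/l로 만들기.py | solution
-- ===== SOURCE A (Python) =====
-- def solution(myString):
--     answer = ''
--     for s in myString:
--         if s < 'l' :
--             s = 'l'
--             answer = answer + s
--         else :
--             answer = answer + s
--     return answer
-- ===== SOURCE B (Python) =====
-- def solution(myString):
--     table = {i: 'l' for i in range(ord('l'))}
--     return myString.translate(table)
-- ===== Notes on version B (the rewrite author's own statement) =====
-- stated objective: faster
-- what changed: B builds a codepoint-to-'l' translation table once and applies it with str.translate in a single library pass, replacing A's explicit per-character loop with a branch and repeated quadratic string concatenation.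
import Mathlib
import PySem

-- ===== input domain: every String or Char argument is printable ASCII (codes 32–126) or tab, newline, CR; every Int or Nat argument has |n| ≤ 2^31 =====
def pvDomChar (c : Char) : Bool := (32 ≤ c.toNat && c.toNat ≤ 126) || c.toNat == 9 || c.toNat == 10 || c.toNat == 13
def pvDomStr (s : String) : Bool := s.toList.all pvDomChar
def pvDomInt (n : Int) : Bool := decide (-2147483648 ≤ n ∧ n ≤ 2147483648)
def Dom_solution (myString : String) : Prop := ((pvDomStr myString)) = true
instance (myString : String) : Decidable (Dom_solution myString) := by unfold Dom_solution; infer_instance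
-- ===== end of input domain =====

-- B builds a codepoint->'l' translation table once and applies it in a single translate pass,
-- replacing A's explicit per-character loop with branch and string concatenation (idiomatic).


-- ===== PORT A =====
def solution (myString : String) : String :=
  myString.toList.foldl
    (fun answer s => if s < 'l' then answer ++ "l" else answer ++ String.ofList [s]) ""

-- ===== PORT B =====
-- table = {i: 'l' for i in range(ord('l'))}
def solTable : PySem.Dict Int Char :=
  (PySem.List.pyRange 0 ('l'.toNat : Int) 1).foldl (fun d i => d.insert i 'l') PySem.Dict.empty

-- myString.translate(table): each char is replaced by its table entry (keyed by codepoint) if present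
def solution_alt (myString : String) : String :=
  String.ofList (myString.toList.map (fun c => (solTable.get? (c.toNat : Int)).getD c))

-- ===== PRECONDITION & SPEC =====
def Spec_solution (myString : String) (out : String) : Prop := out = solution_alt myString
instance (myString : String) (out : String) : Decidable (Spec_solution myString out) := by unfold Spec_solution; infer_instance

-- ===== CLAIM (what is proved, stated in full; the proofs are below) =====
def Claim_equal_solution : Prop := ∀ (myString : String), Dom_solution myString → Spec_solution myString (solution myString)

-- ===== LEMMAS AND PROOFS =====

theorem table_range_get (n : ℕ) (k : Int) :
    (((List.range n).map (fun j => ((j : Nat) : Int))).foldl (fun d i => d.insert i 'l')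
      (PySem.Dict.empty : PySem.Dict Int Char)).get? k
      = if 0 ≤ k ∧ k < n then some 'l' else none := by
  induction n with
  | zero =>
    simp only [List.range_zero, List.map_nil, List.foldl_nil, PySem.Dict.get?_empty]
    have h0 : ¬ (0 ≤ k ∧ k < ((0 : ℕ) : Int)) := by push_cast; omega
    rw [if_neg h0]
  | succ n ih =>
    rw [List.range_succ, List.map_append, List.foldl_append]
    simp only [List.map_cons, List.map_nil, List.foldl_cons, List.foldl_nil]
    rw [PySem.Dict.get?_insert, ih]
    split_ifs <;> first
    | rfl
    | (exfalso; push_cast at *; omega)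

theorem solTable_get (k : Int) :
    solTable.get? k = if 0 ≤ k ∧ k < 108 then some 'l' else none := by
  unfold solTable
  rw [PySem.List.pyRange_one]
  have : (('l'.toNat : Int) - 0).toNat = 108 := by decide
  rw [this]
  simp only [zero_add]
  rw [table_range_get]
  norm_num

theorem translate_char (c : Char) :
    (solTable.get? (c.toNat : Int)).getD c = if c < 'l' then 'l' else c := by
  rw [solTable_get]
  have hlt : c < 'l' ↔ c.toNat < 108 := by
    constructor <;> intro h
    · exact h
    · exact h
  split_ifs with h1 h2 h3 <;> simp_all <;> omega

theorem foldl_eq_map (cs : List Char) (acc : String) :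
    cs.foldl (fun answer s => if s < 'l' then answer ++ "l" else answer ++ String.ofList [s]) acc
      = acc ++ String.ofList (cs.map (fun c => (solTable.get? (c.toNat : Int)).getD c)) := by
  induction cs generalizing acc with
  | nil => simp [String.ext_iff]
  | cons c cs ih =>
    simp only [List.foldl_cons, List.map_cons, ih, translate_char]
    by_cases h : c < 'l' <;> simp [h, String.ext_iff, String.toList_append, String.toList_ofList]

theorem solution_eq (myString : String) : solution myString = solution_alt myString := by
  unfold solution solution_alt
  rw [foldl_eq_map]
  simp

-- ===== VERDICT (by name: the statement is the Claim_ definition above) =====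
theorem solution_spec : Claim_equal_solution := by
  intro s _
  exact solution_eq s
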